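-- pv_equiv track=rewrite | github.com/asweigart/programmedpatterns | book/visualpatterns.py | formula64
-- ===== SOURCE A (Python) =====
-- def formula64(step):
--     width = 5
--     height = 1
--     for i in range(2, step + 1):
--         if i % 2 == 0:
--             width -= 1
--             height += 1
--         elif i % 2 == 1:
--             width += 3
--             height += 4
--     return width * height
-- ===== SOURCE B (Python) =====
-- def formula64(step):
--     # closed form: e = count of even i in [2, step], o = count of odd i in [2, step]
--     if step < 2:
--         return 5
--     e = step // 2
--     o = (step - 1) // 2
--     return (5 - e + 3 * o) * (1 + e + 4 * o)
-- ===== Notes on version B (the rewrite author's own statement) =====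
-- stated objective: faster
-- what changed: Replaces the O(step) accumulation loop by an O(1) closed form counting even and odd indices in [2, step] with two floor divisions.
import Mathlib
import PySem

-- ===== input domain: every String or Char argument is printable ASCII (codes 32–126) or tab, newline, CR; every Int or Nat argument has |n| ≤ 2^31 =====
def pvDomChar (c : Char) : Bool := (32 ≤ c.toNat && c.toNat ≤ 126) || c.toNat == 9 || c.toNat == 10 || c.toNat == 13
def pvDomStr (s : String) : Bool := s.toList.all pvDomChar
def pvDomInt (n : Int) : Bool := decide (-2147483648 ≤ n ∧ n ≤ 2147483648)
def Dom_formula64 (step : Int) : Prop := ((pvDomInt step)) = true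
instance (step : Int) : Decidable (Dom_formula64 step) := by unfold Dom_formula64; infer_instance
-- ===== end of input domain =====

-- ===== PORT A =====
def formula64 (step : Int) : Int :=
  let wh := (PySem.List.pyRange 2 (step + 1) 1).foldl
    (fun (wh : Int × Int) i =>
      if PySem.Int.mod i 2 = 0 then (wh.1 - 1, wh.2 + 1)
      else if PySem.Int.mod i 2 = 1 then (wh.1 + 3, wh.2 + 4)
      else wh) (5, 1)
  wh.1 * wh.2

-- ===== PORT B =====
def formula64_alt (step : Int) : Int :=
  if step < 2 then 5
  else
    let e := PySem.Int.floordiv step 2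
    let o := PySem.Int.floordiv (step - 1) 2
    (5 - e + 3 * o) * (1 + e + 4 * o)

-- ===== PRECONDITION & SPEC =====
def Spec_formula64 (step : Int) (out : Int) : Prop := out = formula64_alt step
instance (step : Int) (out : Int) : Decidable (Spec_formula64 step out) := by unfold Spec_formula64; infer_instance

-- ===== CLAIM (what is proved, stated in full; the proofs are below) =====
def Claim_equal_formula64 : Prop := ∀ (step : Int), Dom_formula64 step → Spec_formula64 step (formula64 step)

-- ===== LEMMAS AND PROOFS =====
-- loop invariant: for k ≥ 1 the fold over range(2, k+1) yields (5 - e + 3o, 1 + e + 4o)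
theorem formula64_loop (k : Int) (hk : 1 ≤ k) :
    (PySem.List.pyRange 2 (k + 1) 1).foldl
      (fun (wh : Int × Int) i =>
        if PySem.Int.mod i 2 = 0 then (wh.1 - 1, wh.2 + 1)
        else if PySem.Int.mod i 2 = 1 then (wh.1 + 3, wh.2 + 4)
        else wh) (5, 1)
      = (5 - k / 2 + 3 * ((k - 1) / 2), 1 + k / 2 + 4 * ((k - 1) / 2)) := by
  induction k, hk using Int.le_induction with
  | base => simp [PySem.List.pyRange_one_eq_nil]
  | succ n hn ih =>
    rw [PySem.List.pyRange_one_succ_right (by omega : (2:Int) ≤ n + 1), List.foldl_append, ih]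
    simp only [List.foldl_cons, List.foldl_nil]
    rw [PySem.Int.mod_eq_emod_of_pos (by omega : (0:Int) < 2)]
    rcases Int.even_or_odd n with ⟨m, hm⟩ | ⟨m, hm⟩ <;> subst hm <;>
      split_ifs <;> simp_all <;> constructor <;> omega

-- ===== VERDICT (by name: the statement is the Claim_ definition above) =====
theorem formula64_spec : Claim_equal_formula64 := by
  intro step _
  unfold Spec_formula64 formula64 formula64_alt
  by_cases h : step < 2
  · rw [PySem.List.pyRange_one_eq_nil (by omega)]
    simp [h]
  · rw [formula64_loop step (by omega)]
    simp only [if_neg h,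
      PySem.Int.floordiv_eq_ediv_of_pos (by omega : (0:Int) < 2)]
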